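-- pv_equiv track=rewrite | github.com/CamilleHuynh/babaiswin | .ipynb_checkpoints/stateHandler-checkpoint.py | isWinState
-- ===== SOURCE A (Python) =====
-- lValues = ["bt","ft","kt"]
--
-- rValues = ["wt","yt"]
--
-- def updateRules(state,rule_list,you_list,win_list):
--     nrow,ncol = len(state),len(state[0])
--     rule_list.clear()
--     you_list.clear()
--     win_list.clear()
--     for row in range(0,nrow):
--         for col in range(0,ncol):
--             if "is" in state[row][col]:
--                 if(row>0 and row<nrow-1):
--                     ll,rl = state[row-1][col],state[row+1][col]
--                     for lv in ll:
--                         for rv in rl: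
--                             if lv in lValues and rv in rValues:
--                                 rule_list.append([lv,"is",rv])
--                 if(col>0 and col<ncol-1):
--                     ll,rl = state[row][col-1],state[row][col+1]
--                     for lv in ll:
--                         for rv in rl:
--                             if lv in lValues and rv in rValues:
--                                 rule_list.append([lv,"is",rv])
--     for rule in rule_list:
--         if rule[2] == "wt":
--             if rule[0] not in win_list:
--                 win_list.append(rule[0].replace("t","o"))
--         if rule[2] == "yt":
--             if rule[0] not in you_list:
--                 you_list.append(rule[0].replace("t","o"))
--
-- def isYou(list, you_list):
--     for elem in list:
--         if elem in you_list:
--             return True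
--     return False
--
-- def isWin(list, win_list):
--     for elem in list:
--         if elem in win_list:
--             return True
--     return False
--
-- def isWinState(state):
--     rule_list = []
--     you_list = []
--     win_list = []
--     updateRules(state,rule_list,you_list,win_list)
--     for row in state:
--         for elem in row:
--             if isYou(elem,you_list) and isWin(elem,win_list):
--                 return True
--     return False
-- ===== SOURCE B (Python) =====
-- lValues = ["bt","ft","kt"]
--
-- def isWinState(state):
--     # Query-based: the rule space is finite (lv in lValues, rv in {"yt","wt"}),
--     # so instead of collecting a rule table from the grid, ask for each of the
--     # six candidate rules whether it exists, with an early-exit scan.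
--     def rule_exists(lv, rv):
--         nrow, ncol = len(state), len(state[0])
--         for r in range(1, nrow - 1):
--             for c in range(ncol):
--                 if "is" in state[r][c] and lv in state[r-1][c] and rv in state[r+1][c]:
--                     return True
--         for r in range(nrow):
--             for c in range(1, ncol - 1):
--                 if "is" in state[r][c] and lv in state[r][c-1] and rv in state[r][c+1]:
--                     return True
--         return False
--
--     you_set = {lv.replace("t", "o") for lv in lValues if rule_exists(lv, "yt")}
--     win_set = {lv.replace("t", "o") for lv in lValues if rule_exists(lv, "wt")}
--     return any(not you_set.isdisjoint(cell) and not win_set.isdisjoint(cell)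
--                for row in state for cell in row)
-- ===== Notes on version B (the rewrite author's own statement) =====
-- stated objective: alternative
-- what changed: B exploits the finite rule space: instead of A's three phases (scan the grid collecting a rule_list, reprocess it into you/win lists, then scan cells), B runs an existence query per candidate rule (3 left-words x 2 right-words), builds the you/win sets from those six answers, and does one any() over the cells; no rule table is ever built.
import Mathlib
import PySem

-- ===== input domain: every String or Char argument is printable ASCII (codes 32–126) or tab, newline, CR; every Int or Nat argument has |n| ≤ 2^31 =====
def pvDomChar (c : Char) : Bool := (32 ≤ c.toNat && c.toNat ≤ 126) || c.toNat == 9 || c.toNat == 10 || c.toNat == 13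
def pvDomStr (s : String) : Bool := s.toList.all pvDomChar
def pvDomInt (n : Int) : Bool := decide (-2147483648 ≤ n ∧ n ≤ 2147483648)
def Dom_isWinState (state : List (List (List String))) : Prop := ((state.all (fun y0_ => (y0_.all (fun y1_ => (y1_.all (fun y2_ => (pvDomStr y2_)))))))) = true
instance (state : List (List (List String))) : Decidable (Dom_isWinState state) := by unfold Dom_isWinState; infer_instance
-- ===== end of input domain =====

-- B replaces A's three phases (collect a rule table, reprocess it into you/win lists,
-- scan cells) by existence queries over the six possible rules, then one any() scan.

-- ===== PORT A =====
def lValues : List String := ["bt", "ft", "kt"]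
def rValues : List String := ["wt", "yt"]

-- the nested 'for lv in ll: for rv in rl: if …: rule_list.append([lv,"is",rv])' loops
def pvPairRules (ll rl : List String) (acc : List (List String)) : List (List String) :=
  ll.foldl (fun acc lv =>
    rl.foldl (fun acc rv =>
      if lv ∈ lValues ∧ rv ∈ rValues then acc ++ [[lv, "is", rv]] else acc) acc) acc

-- updateRules, first phase: rule_list after the grid scan.  All indices are
-- nonnegative and (under Pre_) in range, so Python's xs[i] is List.getD, exact there.
def pvCollectRules (state : List (List (List String))) : List (List String) :=
  let nrow := state.length
  let ncol := (state.headD []).length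
  (List.range nrow).foldl (fun acc row =>
    (List.range ncol).foldl (fun acc col =>
      if "is" ∈ (state.getD row []).getD col [] then
        let acc1 :=
          if 0 < row ∧ row < nrow - 1 then
            pvPairRules ((state.getD (row - 1) []).getD col [])
                        ((state.getD (row + 1) []).getD col []) acc
          else acc
        if 0 < col ∧ col < ncol - 1 then
          pvPairRules ((state.getD row []).getD (col - 1) [])
                      ((state.getD row []).getD (col + 1) []) acc1
        else acc1
      else acc) acc) []

-- updateRules, second phase: (you_list, win_list); rule[0]/rule[2] are in-range indices
def pvBuildLists (rules : List (List String)) : List String × List String :=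
  rules.foldl (fun (yw : List String × List String) rule =>
    let wl := if rule.getD 2 "" = "wt" ∧ rule.getD 0 "" ∉ yw.2
              then yw.2 ++ [PySem.Str.replace (rule.getD 0 "") "t" "o"] else yw.2
    let yl := if rule.getD 2 "" = "yt" ∧ rule.getD 0 "" ∉ yw.1
              then yw.1 ++ [PySem.Str.replace (rule.getD 0 "") "t" "o"] else yw.1
    (yl, wl)) ([], [])

-- isYou / isWin: the early-return membership loops
def pvIsYou (l you_list : List String) : Bool := l.any (fun elem => decide (elem ∈ you_list))
def pvIsWin (l win_list : List String) : Bool := l.any (fun elem => decide (elem ∈ win_list))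

def isWinState (state : List (List (List String))) : Bool :=
  let yw := pvBuildLists (pvCollectRules state)
  state.any (fun row => row.any (fun elem => pvIsYou elem yw.1 && pvIsWin elem yw.2))

-- ===== PORT B =====
-- B's helper rule_exists(lv, rv): does the rule 'lv is rv' exist in the grid?
-- Two early-exit scans: vertical triples (rows 1..nrow-2), then horizontal triples.
def pvRuleExists (state : List (List (List String))) (lv rv : String) : Bool :=
  let nrow := state.length
  let ncol := (state.headD []).length
  ((List.range (nrow - 2)).any (fun i =>
    (List.range ncol).any (fun c =>
      decide ("is" ∈ (state.getD (i + 1) []).getD c []) &&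
      decide (lv ∈ (state.getD i []).getD c []) &&
      decide (rv ∈ (state.getD (i + 2) []).getD c []))))
  || ((List.range nrow).any (fun r =>
    (List.range (ncol - 2)).any (fun j =>
      decide ("is" ∈ (state.getD r []).getD (j + 1) []) &&
      decide (lv ∈ (state.getD r []).getD j []) &&
      decide (rv ∈ (state.getD r []).getD (j + 2) []))))

-- the set comprehensions: {lv.replace("t","o") for lv in lValues if rule_exists(lv, rv)}
def pvQuerySet (state : List (List (List String))) (rv : String) : PySem.Set String :=
  PySem.Set.ofList ((lValues.filter (fun lv => pvRuleExists state lv rv)).map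
    (fun lv => PySem.Str.replace lv "t" "o"))

def isWinState_alt (state : List (List (List String))) : Bool :=
  let you_set := pvQuerySet state "yt"
  let win_set := pvQuerySet state "wt"
  state.any (fun row => row.any (fun cell =>
    !(PySem.Set.isdisjoint you_set cell) && !(PySem.Set.isdisjoint win_set cell)))

-- ===== PRECONDITION & SPEC =====
-- Pre_ excludes exactly the inputs where Python A raises IndexError: the empty grid
-- (len(state[0])) and ragged grids with a row shorter than the first row.
def Pre_isWinState (state : List (List (List String))) : Prop :=
  state ≠ [] ∧ ∀ row ∈ state, (state.headD []).length ≤ row.length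
instance (state : List (List (List String))) : Decidable (Pre_isWinState state) := by
  unfold Pre_isWinState; infer_instance

def pvWitness_isWinState : List (List (List String)) :=
  [[["bt"], ["is"], ["wt"]], [["bo"], ["x"], ["yt"]]]

def Spec_isWinState (state : List (List (List String))) (out : Bool) : Prop := out = isWinState_alt state
instance (state : List (List (List String))) (out : Bool) : Decidable (Spec_isWinState state out) := by unfold Spec_isWinState; infer_instance

-- ===== CLAIM (what is proved, stated in full; the proofs are below) =====
def Claim_equal_isWinState : Prop := ∀ (state : List (List (List String))), Dom_isWinState state → Pre_isWinState state → Spec_isWinState state (isWinState state)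

-- ===== LEMMAS AND PROOFS =====

def pvCell (state : List (List (List String))) (r c : Nat) : List String :=
  (state.getD r []).getD c []

-- the rule 'lv is rv' is witnessed at grid position (row, col)
def pvRuleAt (state : List (List (List String))) (nrow ncol row col : Nat)
    (lv rv : String) : Prop :=
  "is" ∈ pvCell state row col ∧
  ((0 < row ∧ row < nrow - 1 ∧ lv ∈ pvCell state (row - 1) col ∧ rv ∈ pvCell state (row + 1) col) ∨
   (0 < col ∧ col < ncol - 1 ∧ lv ∈ pvCell state row (col - 1) ∧ rv ∈ pvCell state row (col + 1)))

def pvP (state : List (List (List String))) (nrow ncol row col : Nat)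
    (r : List String) : Prop :=
  ∃ lv rv, lv ∈ lValues ∧ rv ∈ rValues ∧ r = [lv, "is", rv] ∧
    pvRuleAt state nrow ncol row col lv rv

theorem pv_foldl_mem {α β : Type} (f : List β → α → List β) (P : α → β → Prop)
    (hf : ∀ acc a x, x ∈ f acc a ↔ x ∈ acc ∨ P a x) (xs : List α) :
    ∀ (acc : List β) (x : β), x ∈ xs.foldl f acc ↔ x ∈ acc ∨ ∃ a ∈ xs, P a x := by
  induction xs with
  | nil => simp
  | cons a xs ih =>
    intro acc x
    rw [List.foldl_cons, ih, hf]
    simp only [List.mem_cons]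
    constructor
    · rintro ((h | h) | ⟨a', ha', h⟩)
      · exact Or.inl h
      · exact Or.inr ⟨a, Or.inl rfl, h⟩
      · exact Or.inr ⟨a', Or.inr ha', h⟩
    · rintro (h | ⟨a', (rfl | ha'), h⟩)
      · exact Or.inl (Or.inl h)
      · exact Or.inl (Or.inr h)
      · exact Or.inr ⟨a', ha', h⟩

theorem pvPairRules_inner_mem (lv : String) (rl : List String) (acc : List (List String))
    (r : List String) :
    r ∈ rl.foldl (fun acc rv =>
        if lv ∈ lValues ∧ rv ∈ rValues then acc ++ [[lv, "is", rv]] else acc) acc ↔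
      r ∈ acc ∨ ∃ rv ∈ rl, lv ∈ lValues ∧ rv ∈ rValues ∧ r = [lv, "is", rv] := by
  apply pv_foldl_mem (P := fun rv r => lv ∈ lValues ∧ rv ∈ rValues ∧ r = [lv, "is", rv])
  intro acc rv x
  split_ifs with h
  · simp only [List.mem_append, List.mem_singleton]
    tauto
  · tauto

theorem pvPairRules_mem (ll rl : List String) (acc : List (List String)) (r : List String) :
    r ∈ pvPairRules ll rl acc ↔
      r ∈ acc ∨ ∃ lv ∈ ll, ∃ rv ∈ rl, lv ∈ lValues ∧ rv ∈ rValues ∧ r = [lv, "is", rv] := by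
  unfold pvPairRules
  apply pv_foldl_mem
    (P := fun lv r => ∃ rv ∈ rl, lv ∈ lValues ∧ rv ∈ rValues ∧ r = [lv, "is", rv])
  intro acc lv x
  exact pvPairRules_inner_mem lv rl acc x

-- membership characterization of A's rule_list
theorem pvCollectRules_mem (state : List (List (List String))) (r : List String) :
    r ∈ pvCollectRules state ↔
      ∃ row ∈ List.range state.length, ∃ col ∈ List.range (state.headD []).length,
        pvP state state.length (state.headD []).length row col r := by
  unfold pvCollectRules
  rw [pv_foldl_mem
    (P := fun row r => ∃ col ∈ List.range (state.headD []).length,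
      pvP state state.length (state.headD []).length row col r)]
  · simp
  · intro acc row x
    rw [pv_foldl_mem
      (P := fun col r => pvP state state.length (state.headD []).length row col r)]
    intro acc col x
    dsimp only
    split_ifs with h1 h2 h3 h4
    · -- "is" holds, col-cond h2 and row-cond h3: horiz pairs over vert pairs
      rw [pvPairRules_mem, pvPairRules_mem]
      unfold pvP pvRuleAt pvCell
      constructor
      · rintro ((h | ⟨lv, hl, rv, hr, c1, c2, rfl⟩) | ⟨lv, hl, rv, hr, c1, c2, rfl⟩)
        · exact Or.inl h
        · exact Or.inr ⟨lv, rv, c1, c2, rfl, h1, Or.inl ⟨h3.1, h3.2, hl, hr⟩⟩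
        · exact Or.inr ⟨lv, rv, c1, c2, rfl, h1, Or.inr ⟨h2.1, h2.2, hl, hr⟩⟩
      · rintro (h | ⟨lv, rv, c1, c2, rfl, _, (⟨_, _, hl, hr⟩ | ⟨_, _, hl, hr⟩)⟩)
        · exact Or.inl (Or.inl h)
        · exact Or.inl (Or.inr ⟨lv, hl, rv, hr, c1, c2, rfl⟩)
        · exact Or.inr ⟨lv, hl, rv, hr, c1, c2, rfl⟩
    · -- col-cond h2, ¬row-cond h3: horizontal pairs only
      rw [pvPairRules_mem]
      unfold pvP pvRuleAt pvCell
      constructor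
      · rintro (h | ⟨lv, hl, rv, hr, c1, c2, rfl⟩)
        · exact Or.inl h
        · exact Or.inr ⟨lv, rv, c1, c2, rfl, h1, Or.inr ⟨h2.1, h2.2, hl, hr⟩⟩
      · rintro (h | ⟨lv, rv, c1, c2, rfl, _, (⟨q1, q2, hl, hr⟩ | ⟨q1, q2, hl, hr⟩)⟩)
        · exact Or.inl h
        · exact absurd ⟨q1, q2⟩ h3
        · exact Or.inr ⟨lv, hl, rv, hr, c1, c2, rfl⟩
    · -- ¬col-cond h2, row-cond h4: vertical pairs only
      rw [pvPairRules_mem]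
      unfold pvP pvRuleAt pvCell
      constructor
      · rintro (h | ⟨lv, hl, rv, hr, c1, c2, rfl⟩)
        · exact Or.inl h
        · exact Or.inr ⟨lv, rv, c1, c2, rfl, h1, Or.inl ⟨h4.1, h4.2, hl, hr⟩⟩
      · rintro (h | ⟨lv, rv, c1, c2, rfl, _, (⟨q1, q2, hl, hr⟩ | ⟨q1, q2, hl, hr⟩)⟩)
        · exact Or.inl h
        · exact Or.inr ⟨lv, hl, rv, hr, c1, c2, rfl⟩
        · exact absurd ⟨q1, q2⟩ h2
    · -- "is" holds, neither neighbour condition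
      unfold pvP pvRuleAt pvCell
      constructor
      · exact Or.inl
      · rintro (h | ⟨lv, rv, c1, c2, rfl, _, (⟨q1, q2, hl, hr⟩ | ⟨q1, q2, hl, hr⟩)⟩)
        · exact h
        · exact absurd ⟨q1, q2⟩ h4
        · exact absurd ⟨q1, q2⟩ h2
    · -- no "is" in the cell
      unfold pvP pvRuleAt pvCell
      constructor
      · exact Or.inl
      · rintro (h | ⟨lv, rv, c1, c2, rfl, hIs, _⟩)
        · exact h
        · exact absurd hIs h1

-- B's existence query agrees with 'some position witnesses the rule'
theorem pvRuleExists_iff (state : List (List (List String))) (lv rv : String) :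
    pvRuleExists state lv rv = true ↔
      ∃ row ∈ List.range state.length, ∃ col ∈ List.range (state.headD []).length,
        pvRuleAt state state.length (state.headD []).length row col lv rv := by
  unfold pvRuleExists pvRuleAt pvCell
  simp only [List.any_eq_true, List.mem_range, Bool.or_eq_true, Bool.and_eq_true,
    decide_eq_true_eq]
  constructor
  · rintro (⟨i, hi, c, hc, ⟨hIs, hl⟩, hr⟩ | ⟨r, hr', j, hj, ⟨hIs, hl⟩, hr2⟩)
    · exact ⟨i + 1, by omega, c, hc, hIs, Or.inl ⟨by omega, by omega, by simpa using hl,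
        by simpa using hr⟩⟩
    · exact ⟨r, hr', j + 1, by omega, hIs, Or.inr ⟨by omega, by omega, by simpa using hl,
        by simpa using hr2⟩⟩
  · rintro ⟨row, hrow, col, hcol, hIs, (⟨p1, p2, hl, hr⟩ | ⟨p1, p2, hl, hr⟩)⟩
    · refine Or.inl ⟨row - 1, by omega, col, hcol, ⟨⟨?_, ?_⟩, ?_⟩⟩
      · rw [show row - 1 + 1 = row by omega]; exact hIs
      · exact hl
      · rw [show row - 1 + 2 = row + 1 by omega]; exact hr
    · refine Or.inr ⟨row, hrow, col - 1, by omega, ⟨⟨?_, ?_⟩, ?_⟩⟩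
      · rw [show col - 1 + 1 = col by omega]; exact hIs
      · exact hl
      · rw [show col - 1 + 2 = col + 1 by omega]; exact hr

def pvYouOf (rls : List (List String)) (x : String) : Prop :=
  ∃ r ∈ rls, r.getD 2 "" = "yt" ∧ x = PySem.Str.replace (r.getD 0 "") "t" "o"

def pvWinOf (rls : List (List String)) (x : String) : Prop :=
  ∃ r ∈ rls, r.getD 2 "" = "wt" ∧ x = PySem.Str.replace (r.getD 0 "") "t" "o"

def pvRuleForm (r : List String) : Prop :=
  ∃ lv rv, lv ∈ lValues ∧ rv ∈ rValues ∧ r = [lv, "is", rv]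

def pvReps : List String := ["bo", "fo", "ko"]

theorem pvRepl_mem : ∀ lv ∈ lValues, PySem.Str.replace lv "t" "o" ∈ pvReps := by decide

theorem pvL_not_reps : ∀ lv ∈ lValues, lv ∉ pvReps := by decide

theorem pvYouOf_cons (r : List String) (rls : List (List String)) (x : String) :
    pvYouOf (r :: rls) x ↔
      (r.getD 2 "" = "yt" ∧ x = PySem.Str.replace (r.getD 0 "") "t" "o") ∨ pvYouOf rls x := by
  simp [pvYouOf]

theorem pvWinOf_cons (r : List String) (rls : List (List String)) (x : String) :
    pvWinOf (r :: rls) x ↔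
      (r.getD 2 "" = "wt" ∧ x = PySem.Str.replace (r.getD 0 "") "t" "o") ∨ pvWinOf rls x := by
  simp [pvWinOf]

set_option maxHeartbeats 1000000 in
theorem pvBuildLists_go (rls : List (List String)) :
    ∀ (yl wl : List String), (∀ r ∈ rls, pvRuleForm r) →
    (∀ y ∈ yl, y ∈ pvReps) → (∀ w ∈ wl, w ∈ pvReps) →
    (∀ x, (x ∈ (rls.foldl (fun (yw : List String × List String) rule =>
        let wl := if rule.getD 2 "" = "wt" ∧ rule.getD 0 "" ∉ yw.2
                  then yw.2 ++ [PySem.Str.replace (rule.getD 0 "") "t" "o"] else yw.2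
        let yl := if rule.getD 2 "" = "yt" ∧ rule.getD 0 "" ∉ yw.1
                  then yw.1 ++ [PySem.Str.replace (rule.getD 0 "") "t" "o"] else yw.1
        (yl, wl)) (yl, wl)).1 ↔ x ∈ yl ∨ pvYouOf rls x) ∧
      (x ∈ (rls.foldl (fun (yw : List String × List String) rule =>
        let wl := if rule.getD 2 "" = "wt" ∧ rule.getD 0 "" ∉ yw.2
                  then yw.2 ++ [PySem.Str.replace (rule.getD 0 "") "t" "o"] else yw.2
        let yl := if rule.getD 2 "" = "yt" ∧ rule.getD 0 "" ∉ yw.1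
                  then yw.1 ++ [PySem.Str.replace (rule.getD 0 "") "t" "o"] else yw.1
        (yl, wl)) (yl, wl)).2 ↔ x ∈ wl ∨ pvWinOf rls x)) := by
  induction rls with
  | nil => intro yl wl _ _ _ x; simp [pvYouOf, pvWinOf]
  | cons r rls ih =>
    intro yl wl hform hyl hwl x
    obtain ⟨lv, rv, hlv, hrv, rfl⟩ := hform r List.mem_cons_self
    have hlvyl : lv ∉ yl := fun hh => pvL_not_reps lv hlv (hyl lv hh)
    have hlvwl : lv ∉ wl := fun hh => pvL_not_reps lv hlv (hwl lv hh)
    simp only [List.foldl_cons]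
    have hgd2 : ([lv, "is", rv] : List String).getD 2 "" = rv := rfl
    have hgd0 : ([lv, "is", rv] : List String).getD 0 "" = lv := rfl
    rw [hgd2, hgd0]
    have hrv' : rv = "wt" ∨ rv = "yt" := by simpa [rValues] using hrv
    have hrep := pvRepl_mem lv hlv
    have hform' : ∀ r' ∈ rls, pvRuleForm r' := fun r' hr' => hform r' (List.mem_cons_of_mem _ hr')
    rcases hrv' with rfl | rfl
    · -- rv = "wt": you-if is vacuous, win list gains replace lv
      split_ifs with h1 h2 h2
      · exact absurd h1.1 (by decide)
      · exact absurd h1.1 (by decide)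
      · have := ih yl (wl ++ [PySem.Str.replace lv "t" "o"]) hform' hyl
          (fun w hw => by
            rcases List.mem_append.mp hw with hm | hm
            · exact hwl w hm
            · simpa [List.mem_singleton.mp hm] using hrep)
        rcases this x with ⟨iy, iw⟩
        constructor
        · rw [iy, pvYouOf_cons, hgd2, hgd0]
          constructor
          · rintro (hh | hh)
            · exact Or.inl hh
            · exact Or.inr (Or.inr hh)
          · rintro (hh | (hh | hh))
            · exact Or.inl hh
            · exact absurd hh.1 (by decide)
            · exact Or.inr hh
        · rw [iw, pvWinOf_cons, hgd2, hgd0]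
          simp only [List.mem_append, List.mem_singleton]
          constructor
          · rintro ((hh | hh) | hh)
            · exact Or.inl hh
            · exact Or.inr (Or.inl ⟨by trivial, hh⟩)
            · exact Or.inr (Or.inr hh)
          · rintro (hh | (⟨_, hh⟩ | hh))
            · exact Or.inl (Or.inl hh)
            · exact Or.inl (Or.inr hh)
            · exact Or.inr hh
      · exact absurd ⟨rfl, hlvwl⟩ h2
    · -- rv = "yt": win-if is vacuous, you list gains replace lv
      split_ifs with h1 h2 h2
      · exact absurd h2.1 (by decide)
      · have := ih (yl ++ [PySem.Str.replace lv "t" "o"]) wl hform'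
          (fun y hy => by
            rcases List.mem_append.mp hy with hm | hm
            · exact hyl y hm
            · simpa [List.mem_singleton.mp hm] using hrep)
          hwl
        rcases this x with ⟨iy, iw⟩
        constructor
        · rw [iy, pvYouOf_cons, hgd2, hgd0]
          simp only [List.mem_append, List.mem_singleton]
          constructor
          · rintro ((hh | hh) | hh)
            · exact Or.inl hh
            · exact Or.inr (Or.inl ⟨by trivial, hh⟩)
            · exact Or.inr (Or.inr hh)
          · rintro (hh | (⟨_, hh⟩ | hh))
            · exact Or.inl (Or.inl hh)
            · exact Or.inl (Or.inr hh)
            · exact Or.inr hh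
        · rw [iw, pvWinOf_cons, hgd2, hgd0]
          constructor
          · rintro (hh | hh)
            · exact Or.inl hh
            · exact Or.inr (Or.inr hh)
          · rintro (hh | (hh | hh))
            · exact Or.inl hh
            · exact absurd hh.1 (by decide)
            · exact Or.inr hh
      · exact absurd ⟨rfl, hlvyl⟩ h1
      · exact absurd ⟨rfl, hlvyl⟩ h1

theorem pvCollect_form (state : List (List (List String))) :
    ∀ r ∈ pvCollectRules state, pvRuleForm r := by
  intro r hr
  obtain ⟨row, _, col, _, lv, rv, c1, c2, rfl, _⟩ := (pvCollectRules_mem state r).mp hr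
  exact ⟨lv, rv, c1, c2, rfl⟩

-- both sides reduce to the same query predicate
theorem pvQuery_char (state : List (List (List String))) (rv x : String) :
    (x ∈ pvQuerySet state rv ↔
      ∃ lv ∈ lValues, pvRuleExists state lv rv = true ∧ x = PySem.Str.replace lv "t" "o") := by
  unfold pvQuerySet
  rw [PySem.Set.mem_ofList]
  simp only [List.mem_map, List.mem_filter]
  constructor
  · rintro ⟨lv, ⟨hl, hq⟩, rfl⟩
    exact ⟨lv, hl, hq, rfl⟩
  · rintro ⟨lv, hl, hq, rfl⟩
    exact ⟨lv, ⟨hl, hq⟩, rfl⟩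

theorem pvYouOf_query (state : List (List (List String))) (x : String) :
    pvYouOf (pvCollectRules state) x ↔ x ∈ pvQuerySet state "yt" := by
  rw [pvQuery_char state "yt" x]
  unfold pvYouOf
  constructor
  · rintro ⟨r, hr, h2, h0⟩
    obtain ⟨row, hrow, col, hcol, lv, rv, c1, c2, rfl, hat⟩ := (pvCollectRules_mem state r).mp hr
    have : rv = "yt" := by simpa using h2
    subst this
    exact ⟨lv, c1, (pvRuleExists_iff state lv "yt").mpr ⟨row, hrow, col, hcol, hat⟩,
      by simpa using h0⟩
  · rintro ⟨lv, hl, hq, rfl⟩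
    obtain ⟨row, hrow, col, hcol, hat⟩ := (pvRuleExists_iff state lv "yt").mp hq
    exact ⟨[lv, "is", "yt"],
      (pvCollectRules_mem state _).mpr ⟨row, hrow, col, hcol, lv, "yt", hl, by decide, rfl, hat⟩,
      rfl, rfl⟩

theorem pvWinOf_query (state : List (List (List String))) (x : String) :
    pvWinOf (pvCollectRules state) x ↔ x ∈ pvQuerySet state "wt" := by
  rw [pvQuery_char state "wt" x]
  unfold pvWinOf
  constructor
  · rintro ⟨r, hr, h2, h0⟩
    obtain ⟨row, hrow, col, hcol, lv, rv, c1, c2, rfl, hat⟩ := (pvCollectRules_mem state r).mp hr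
    have : rv = "wt" := by simpa using h2
    subst this
    exact ⟨lv, c1, (pvRuleExists_iff state lv "wt").mpr ⟨row, hrow, col, hcol, hat⟩,
      by simpa using h0⟩
  · rintro ⟨lv, hl, hq, rfl⟩
    obtain ⟨row, hrow, col, hcol, hat⟩ := (pvRuleExists_iff state lv "wt").mp hq
    exact ⟨[lv, "is", "wt"],
      (pvCollectRules_mem state _).mpr ⟨row, hrow, col, hcol, lv, "wt", hl, by decide, rfl, hat⟩,
      rfl, rfl⟩

theorem pvLists_mem (state : List (List (List String))) (x : String) :
    (x ∈ (pvBuildLists (pvCollectRules state)).1 ↔ x ∈ pvQuerySet state "yt") ∧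
    (x ∈ (pvBuildLists (pvCollectRules state)).2 ↔ x ∈ pvQuerySet state "wt") := by
  rcases pvBuildLists_go (pvCollectRules state) [] [] (pvCollect_form state)
    (by simp) (by simp) x with ⟨iy, iw⟩
  unfold pvBuildLists
  constructor
  · rw [iy, ← pvYouOf_query state x]; simp
  · rw [iw, ← pvWinOf_query state x]; simp

theorem pvNotDisj (s t : List String) :
    PySem.Set.isdisjoint s t = false ↔ ∃ x ∈ s, x ∈ t := by
  rw [← Bool.not_eq_true, PySem.Set.isdisjoint_iff]
  push Not
  rfl

-- ===== VERDICT =====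
theorem isWinState_spec : Claim_equal_isWinState := by
  intro state _ _
  unfold Spec_isWinState isWinState isWinState_alt
  dsimp only
  refine PySem.List.any_congr_mem (fun row _ => ?_)
  refine PySem.List.any_congr_mem (fun cell _ => ?_)
  have h1 : pvIsYou cell (pvBuildLists (pvCollectRules state)).1
      = !(PySem.Set.isdisjoint (pvQuerySet state "yt") cell) := by
    rw [Bool.eq_iff_iff]
    simp only [pvIsYou, List.any_eq_true, decide_eq_true_eq, Bool.not_eq_true', pvNotDisj]
    constructor
    · rintro ⟨e, he, hm⟩; exact ⟨e, (pvLists_mem state e).1.mp hm, he⟩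
    · rintro ⟨e, hm, he⟩; exact ⟨e, he, (pvLists_mem state e).1.mpr hm⟩
  have h2 : pvIsWin cell (pvBuildLists (pvCollectRules state)).2
      = !(PySem.Set.isdisjoint (pvQuerySet state "wt") cell) := by
    rw [Bool.eq_iff_iff]
    simp only [pvIsWin, List.any_eq_true, decide_eq_true_eq, Bool.not_eq_true', pvNotDisj]
    constructor
    · rintro ⟨e, he, hm⟩; exact ⟨e, (pvLists_mem state e).2.mp hm, he⟩
    · rintro ⟨e, hm, he⟩; exact ⟨e, he, (pvLists_mem state e).2.mpr hm⟩
  rw [h1, h2]
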